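-- pv_equiv track=rewrite | github.com/martinberry/data_process | scrape_translation_api/TranslateWithGoogleApi.py | is_too_much_same_characters
-- ===== SOURCE A (Python) =====
-- def is_too_much_same_characters(source, target):
--
--     si = len(source) - 1
--     ti = len(target) - 1
--     threshold = 30
--
--     while threshold > 0 and si >= 0 and ti >= 0:
--         if source[si] != target[ti]:
--             return False
--         threshold -= 1
--         si -= 1
--         ti -= 1
--     return True
-- ===== SOURCE B (Python) =====
-- def is_too_much_same_characters(source, target):
--     n = min(len(source), len(target), 30)
--     return source[len(source) - n:] == target[len(target) - n:]
-- ===== Notes on version B (the rewrite author's own statement) =====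
-- stated objective: simpler
-- what changed: Replaces the manual backward index loop with early exit by computing n = min(len(source), len(target), 30) up front and comparing the two length-n suffixes with a single slice equality.
import Mathlib
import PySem

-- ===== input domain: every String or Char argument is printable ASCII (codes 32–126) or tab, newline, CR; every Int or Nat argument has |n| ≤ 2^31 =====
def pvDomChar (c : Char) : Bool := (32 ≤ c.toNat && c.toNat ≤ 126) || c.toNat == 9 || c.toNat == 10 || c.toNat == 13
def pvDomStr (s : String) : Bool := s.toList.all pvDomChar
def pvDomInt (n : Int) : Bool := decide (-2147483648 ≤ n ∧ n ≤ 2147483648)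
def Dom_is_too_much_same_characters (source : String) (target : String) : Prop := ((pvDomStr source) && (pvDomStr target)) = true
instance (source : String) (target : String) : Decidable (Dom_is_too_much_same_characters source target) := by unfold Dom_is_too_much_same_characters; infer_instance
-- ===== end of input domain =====

-- B replaces A's backward index loop (early exit) by comparing the length-n suffix slices, n = min(len source, len target, 30); objective: simpler.

-- ===== PORT A =====
-- A's while loop, state (threshold, si, ti); indexing via PySem.Str.pyGet? (always in range under the guard)
def pvLoopA (source : String) (target : String) (threshold : Int) (si : Int) (ti : Int) : Bool :=
  if h : threshold > 0 ∧ si ≥ 0 ∧ ti ≥ 0 then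
    if PySem.Str.pyGet? source si ≠ PySem.Str.pyGet? target ti then false
    else pvLoopA source target (threshold - 1) (si - 1) (ti - 1)
  else true
termination_by threshold.toNat
decreasing_by omega

def is_too_much_same_characters (source : String) (target : String) : Bool :=
  pvLoopA source target 30 (PySem.Str.len source - 1) (PySem.Str.len target - 1)

-- ===== PORT B =====
def is_too_much_same_characters_alt (source : String) (target : String) : Bool :=
  let n : Int := min (min (PySem.Str.len source) (PySem.Str.len target)) 30
  PySem.Str.slice source (some (PySem.Str.len source - n)) none
    == PySem.Str.slice target (some (PySem.Str.len target - n)) none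

-- ===== PRECONDITION & SPEC =====
def Spec_is_too_much_same_characters (source : String) (target : String) (out : Bool) : Prop := out = is_too_much_same_characters_alt source target
instance (source : String) (target : String) (out : Bool) : Decidable (Spec_is_too_much_same_characters source target out) := by unfold Spec_is_too_much_same_characters; infer_instance

-- ===== CLAIM (what is proved, stated in full; the proofs are below) =====
def Claim_equal_is_too_much_same_characters : Prop := ∀ (source : String) (target : String), Dom_is_too_much_same_characters source target → Spec_is_too_much_same_characters source target (is_too_much_same_characters source target)

-- ===== LEMMAS AND PROOFS =====

-- elementwise comparison of the first n characters (true once any of the three limits is reached)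
def eqPrefix : Nat → List Char → List Char → Bool
  | 0, _, _ => true
  | _ + 1, [], _ => true
  | _ + 1, _, [] => true
  | n + 1, c :: a, d :: b => c == d && eqPrefix n a b

-- A's loop on the reversed views of its strings computes eqPrefix of the reversed strings
theorem pvLoopA_eq_eqPrefix (n : Nat) (rs rt exts extt : List Char) :
    pvLoopA (String.ofList (rs.reverse ++ exts)) (String.ofList (rt.reverse ++ extt))
      (n : Int) ((rs.length : Int) - 1) ((rt.length : Int) - 1) = eqPrefix n rs rt := by
  induction n generalizing rs rt exts extt with
  | zero => rw [pvLoopA]; simp [eqPrefix]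
  | succ n ih =>
    match rs, rt with
    | [], rt => rw [pvLoopA]; simp [eqPrefix]
    | c :: rs', [] => rw [pvLoopA]; simp [eqPrefix]
    | c :: rs', d :: rt' =>
      rw [pvLoopA]
      rw [dif_pos (by push_cast [List.length_cons]; omega)]
      have h1 : ((List.length (c :: rs') : Int)) - 1 = (rs'.length : Int) := by
        push_cast [List.length_cons]; omega
      have h2 : ((List.length (d :: rt') : Int)) - 1 = (rt'.length : Int) := by
        push_cast [List.length_cons]; omega
      rw [h1, h2]
      have g1 : PySem.Str.pyGet? (String.ofList ((c :: rs').reverse ++ exts)) ((rs'.length : Int)) = some c := by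
        simp [List.reverse_cons, List.append_assoc]
      have g2 : PySem.Str.pyGet? (String.ofList ((d :: rt').reverse ++ extt)) ((rt'.length : Int)) = some d := by
        simp [List.reverse_cons, List.append_assoc]
      rw [g1, g2]
      by_cases hcd : c = d
      · subst hcd
        rw [if_neg (by simp)]
        have := ih rs' rt' (c :: exts) (c :: extt)
        simp only [List.reverse_cons, List.append_assoc, List.singleton_append] at this ⊢
        have e1 : (((n + 1 : Nat)) : Int) - 1 = (n : Int) := by push_cast; omega
        rw [e1, this]
        simp [eqPrefix]
      · rw [if_pos (by simp [hcd])]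
        simp [eqPrefix, hcd]

-- eqPrefix is equality of the clamped take-prefixes
theorem eqPrefix_eq_take (n : Nat) (a b : List Char) :
    eqPrefix n a b = decide (a.take (min n (min a.length b.length)) = b.take (min n (min a.length b.length))) := by
  induction n generalizing a b with
  | zero => simp [eqPrefix]
  | succ n ih =>
    match a, b with
    | [], b => simp [eqPrefix]
    | c :: a, [] => simp [eqPrefix]
    | c :: a, d :: b =>
      have hm : min (n+1) (min (c::a).length (d::b).length) = min n (min a.length b.length) + 1 := by
        simp only [List.length_cons]; omega
      rw [hm]
      simp only [eqPrefix, List.take_succ_cons, ih]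
      by_cases hcd : c = d <;> simp [hcd]

theorem beq_eq_decide_toList (x y : String) : (x == y) = decide (x.toList = y.toList) := by
  by_cases h : x = y
  · simp [h]
  · have : x.toList ≠ y.toList := fun he => h (String.toList_inj.mp he)
    simp [h, this]

theorem drop_reverse_take (xs : List Char) (k m : Nat) (hm : m = xs.length - k) :
    (xs.drop k).reverse = xs.reverse.take m := by
  rw [List.reverse_drop, hm]

-- ===== VERDICT (by name: the statement is the Claim_ definition above) =====
theorem is_too_much_same_characters_spec : Claim_equal_is_too_much_same_characters := by
  intro source target _
  unfold Spec_is_too_much_same_characters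
  unfold is_too_much_same_characters is_too_much_same_characters_alt
  -- the A side
  have hA := pvLoopA_eq_eqPrefix 30 source.toList.reverse target.toList.reverse [] []
  simp only [List.reverse_reverse, List.append_nil, List.length_reverse,
    String.ofList_toList, Nat.cast_ofNat] at hA
  have hlenS : PySem.Str.len source = (source.toList.length : Int) := by simp [PySem.Str.len_eq]
  have hlenT : PySem.Str.len target = (target.toList.length : Int) := by simp [PySem.Str.len_eq]
  rw [hlenS, hlenT, hA, eqPrefix_eq_take]
  -- the B side
  set ls : Int := (source.toList.length : Int) with hls
  set lt : Int := (target.toList.length : Int) with hlt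
  set n : Int := min (min ls lt) 30 with hn
  set m : Nat := min 30 (min source.toList.reverse.length target.toList.reverse.length) with hm
  have hm' : m = min 30 (min source.toList.length target.toList.length) := by
    simp [hm]
  have hn0 : 0 ≤ n := by omega
  have hnls : n ≤ ls := by omega
  have hnlt : n ≤ lt := by omega
  rw [beq_eq_decide_toList]
  rw [show (PySem.Str.slice source (some (ls - n)) none).toList = source.toList.drop (ls - n).toNat by
    simp [PySem.Str.toList_slice, PySem.List.slice_from _ (by omega : (0:Int) ≤ ls - n)]]
  rw [show (PySem.Str.slice target (some (lt - n)) none).toList = target.toList.drop (lt - n).toNat by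
    simp [PySem.Str.toList_slice, PySem.List.slice_from _ (by omega : (0:Int) ≤ lt - n)]]
  have eS : (source.toList.drop (ls - n).toNat).reverse = source.toList.reverse.take m :=
    drop_reverse_take _ _ _ (by omega)
  have eT : (target.toList.drop (lt - n).toNat).reverse = target.toList.reverse.take m :=
    drop_reverse_take _ _ _ (by omega)
  have : (source.toList.reverse.take m = target.toList.reverse.take m)
      ↔ (source.toList.drop (ls - n).toNat = target.toList.drop (lt - n).toNat) := by
    rw [← eS, ← eT, List.reverse_inj]
  simp only [List.length_reverse] at *
  rw [decide_eq_decide.mpr this]
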